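-- pv_equiv track=rewrite | github.com/Marin260/adventOfCode | py/2024/day2/main.py | validList
-- ===== SOURCE A (Python) =====
-- def validList(line):
--     diff_is_ok = True
--     inc_or_dec = (sorted(line) == line or sorted(line, reverse=True) == line)
--     for i in range(len(line)-1):
--         if abs(line[i] - line[i+1]) not in (1, 2, 3):
--             diff_is_ok = False
--     if diff_is_ok == True and inc_or_dec:
--         return True
--     return False
-- ===== SOURCE B (Python) =====
-- def validList(line):
--     if len(line) < 2:
--         return True
--     inc = line[1] > line[0]
--     for a, b in zip(line, line[1:]):
--         d = b - a
--         if not (1 <= abs(d) <= 3) or (d > 0) != inc: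
--             return False
--     return True
-- ===== Notes on version B (the rewrite author's own statement) =====
-- stated objective: faster
-- what changed: Replaces the two sorts plus a separate index loop with a single linear pass over adjacent pairs that checks the diff magnitude (1..3) and a consistent direction fixed by the first pair.
import Mathlib
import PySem

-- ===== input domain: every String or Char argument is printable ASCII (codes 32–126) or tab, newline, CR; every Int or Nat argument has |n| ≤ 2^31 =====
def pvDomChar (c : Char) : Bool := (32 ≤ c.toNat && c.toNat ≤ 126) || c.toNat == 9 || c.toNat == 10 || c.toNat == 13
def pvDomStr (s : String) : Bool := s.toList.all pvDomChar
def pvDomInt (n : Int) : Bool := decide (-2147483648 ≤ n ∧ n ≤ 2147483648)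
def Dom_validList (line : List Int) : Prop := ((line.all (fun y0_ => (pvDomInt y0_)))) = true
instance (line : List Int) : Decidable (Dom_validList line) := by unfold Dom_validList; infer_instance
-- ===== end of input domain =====

-- B replaces A's two sorts + separate index loop by one linear pass over adjacent pairs (objective: faster).


-- ===== PORT A =====
def validList (line : List Int) : Bool :=
  let diff_is_ok := (PySem.List.pyRange 0 ((line.length : Int) - 1) 1).foldl
    (fun acc i =>
      if ¬ ((PySem.List.pyGetD line i 0 - PySem.List.pyGetD line (i + 1) 0).natAbs ∈ ([1, 2, 3] : List Nat))
      then false else acc) true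
  let inc_or_dec := (PySem.List.sorted line (fun x => x) == line)
      || (PySem.List.sorted line (fun x => x) true == line)
  if diff_is_ok == true && inc_or_dec then true else false

-- ===== PORT B =====
def altGo (inc : Bool) : List Int → Bool
  | a :: b :: rest =>
    let d := b - a
    if ¬ (1 ≤ d.natAbs ∧ d.natAbs ≤ 3) ∨ decide (0 < d) ≠ inc then false
    else altGo inc (b :: rest)
  | _ => true

def validList_alt (line : List Int) : Bool :=
  match line with
  | [] => true
  | [_] => true
  | a :: b :: rest => altGo (decide (a < b)) (a :: b :: rest)

-- ===== PRECONDITION & SPEC =====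
def Spec_validList (line : List Int) (out : Bool) : Prop := out = validList_alt line
instance (line : List Int) (out : Bool) : Decidable (Spec_validList line out) := by unfold Spec_validList; infer_instance

-- ===== CLAIM (what is proved, stated in full; the proofs are below) =====
def Claim_equal_validList : Prop := ∀ (line : List Int), Dom_validList line → Spec_validList line (validList line)

-- ===== LEMMAS AND PROOFS =====

-- B's pairwise condition: diff magnitude in 1..3 and direction matching inc
def Good (inc : Bool) (a b : Int) : Prop :=
  (1 ≤ (b - a).natAbs ∧ (b - a).natAbs ≤ 3) ∧ decide (0 < b - a) = inc

-- A's fold over range returns the conjunction "no index is bad"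
theorem foldl_range_if (p : Nat → Prop) [DecidablePred p] (n : Nat) (b : Bool) :
    (List.range n).foldl (fun acc k => if p k then false else acc) b
      = (b && decide (∀ k < n, ¬ p k)) := by
  induction n generalizing b with
  | zero => simp
  | succ m ih =>
    rw [List.range_succ, List.foldl_append, ih]
    by_cases hp : p m
    · simp only [List.foldl_cons, List.foldl_nil, if_pos hp]
      have hdec : decide (∀ k < m + 1, ¬ p k) = false := by
        simp only [decide_eq_false_iff_not]
        exact fun h => h m (Nat.lt_succ_self m) hp
      rw [hdec, Bool.and_false]
    · simp only [List.foldl_cons, List.foldl_nil, if_neg hp]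
      congr 1
      simp only [decide_eq_decide]
      constructor
      · intro h k hk
        rcases Nat.lt_succ_iff_lt_or_eq.mp hk with h' | h'
        · exact h k h'
        · subst h'; exact hp
      · intro h k hk; exact h k (Nat.lt_succ_of_lt hk)

theorem sorted_id_eq_iff (l : List Int) :
    PySem.List.sorted l (fun x => x) = l ↔ l.Pairwise (· ≤ ·) := by
  constructor
  · intro h
    have hp := PySem.List.sorted_pairwise l (fun x => x)
    rw [h] at hp
    exact hp
  · intro h
    apply PySem.List.sorted_eq_self_of_pairwise
    exact h

theorem sorted_id_rev_eq_iff (l : List Int) :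
    PySem.List.sorted l (fun x => x) true = l ↔ l.Pairwise (fun a b => b ≤ a) := by
  constructor
  · intro h
    have hp := PySem.List.sorted_pairwise_rev l (fun x => x)
    rw [h] at hp
    exact hp
  · intro h
    apply PySem.List.sorted_rev_eq_self_of_pairwise
    exact h

theorem bool_if_id (c : Bool) : (if c = true then true else false) = c := by
  cases c <;> rfl

theorem validList_eq_true_iff (l : List Int) :
    validList l = true ↔
      ((l.Pairwise (· ≤ ·) ∨ l.Pairwise (fun a b => b ≤ a)) ∧
        ∀ (i : Nat) (h : i + 1 < l.length),
          (l[i] - l[i + 1]).natAbs ∈ ([1, 2, 3] : List Nat)) := by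
  unfold validList
  rw [PySem.List.pyRange_one]
  rw [List.foldl_map]
  rw [foldl_range_if (p := fun k : Nat =>
    ¬ ((PySem.List.pyGetD l ((0 : Int) + k) 0 - PySem.List.pyGetD l (((0 : Int) + k) + 1) 0).natAbs
        ∈ ([1, 2, 3] : List Nat)))]
  have hn : (((l.length : Int) - 1 - 0).toNat) = l.length - 1 := by omega
  rw [hn, bool_if_id]
  simp only [Bool.true_and, Bool.and_eq_true, beq_iff_eq, Bool.or_eq_true, decide_eq_true_eq]
  have hget : ∀ (k : Nat) (h : k + 1 < l.length),
      (PySem.List.pyGetD l ((0 : Int) + k) 0 - PySem.List.pyGetD l (((0 : Int) + k) + 1) 0)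
        = l[k] - l[k + 1] := by
    intro k h
    have h0 : ((0 : Int) + (k : Int)) = ((k : Nat) : Int) := by omega
    have h1 : (((k : Nat) : Int) + 1) = (((k + 1 : Nat)) : Int) := by omega
    rw [h0, h1, PySem.List.pyGetD_natCast, PySem.List.pyGetD_natCast,
      List.getD_eq_getElem l 0 (by omega), List.getD_eq_getElem l 0 h]
  constructor
  · rintro ⟨hd, hs⟩
    refine ⟨?_, ?_⟩
    · rcases hs with hs | hs
      · exact Or.inl ((sorted_id_eq_iff l).mp hs)
      · exact Or.inr ((sorted_id_rev_eq_iff l).mp hs)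
    · intro i hi
      have hk : i < l.length - 1 := by omega
      have hni := hd i hk
      rw [not_not, hget i hi] at hni
      exact hni
  · rintro ⟨hs, hd⟩
    refine ⟨?_, ?_⟩
    · intro k hk
      rw [not_not, hget k (by omega)]
      exact hd k (by omega)
    · rcases hs with hs | hs
      · exact Or.inl ((sorted_id_eq_iff l).mpr hs)
      · exact Or.inr ((sorted_id_rev_eq_iff l).mpr hs)

theorem altGo_eq_true_iff (inc : Bool) (l : List Int) :
    altGo inc l = true ↔ List.IsChain (Good inc) l := by
  induction l with
  | nil => simp [altGo]
  | cons a tail ih =>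
    cases tail with
    | nil => simp [altGo]
    | cons b rest =>
      rw [List.isChain_cons_cons, ← ih]
      show (if ¬ (1 ≤ (b - a).natAbs ∧ (b - a).natAbs ≤ 3) ∨ decide (0 < b - a) ≠ inc
            then false else altGo inc (b :: rest)) = true ↔ _
      split_ifs with h
      · simp only [false_iff, not_and]
        intro hg
        rcases h with h | h
        · exact absurd hg.1 h
        · exact fun _ => absurd hg.2 h
      · obtain ⟨h1, h2⟩ := not_or.mp h
        rw [not_not] at h1
        rw [ne_eq, not_not] at h2
        constructor
        · intro ht
          exact ⟨⟨h1, h2⟩, ht⟩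
        · intro hg
          exact hg.2

theorem mem_123_iff (n : Nat) : n ∈ ([1, 2, 3] : List Nat) ↔ (1 ≤ n ∧ n ≤ 3) := by
  simp only [List.mem_cons, List.not_mem_nil, or_false]
  omega

theorem main_iff (l : List Int) : validList l = validList_alt l := by
  rw [Bool.eq_iff_iff, validList_eq_true_iff]
  rcases l with _ | ⟨a, _ | ⟨b, rest⟩⟩
  · constructor
    · intro; rfl
    · intro
      exact ⟨Or.inl List.Pairwise.nil, by intro i hi; simp at hi⟩
  · constructor
    · intro; rfl
    · intro
      refine ⟨Or.inl ?_, by intro i hi; simp at hi⟩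
      simp
  · show _ ↔ altGo (decide (a < b)) (a :: b :: rest) = true
    rw [altGo_eq_true_iff, List.isChain_iff_getElem]
    set l' : List Int := a :: b :: rest with hl'
    have hlen : 0 + 1 < l'.length := by simp [hl']
    have hget0 : l'[0] = a := rfl
    have hget1 : l'[1]'(by simpa using hlen) = b := rfl
    constructor
    · rintro ⟨hmono, hd⟩
      have hdiff : ∀ (i : Nat) (h : i + 1 < l'.length),
          1 ≤ (l'[i + 1] - l'[i]).natAbs ∧ (l'[i + 1] - l'[i]).natAbs ≤ 3 := by
        intro i h
        have := (mem_123_iff _).mp (hd i h)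
        omega
      rcases hmono with hm | hm
      · have hadj : ∀ (i : Nat) (h : i + 1 < l'.length), l'[i] ≤ l'[i + 1] :=
          List.isChain_iff_getElem.mp (List.isChain_iff_pairwise.mpr hm)
        have hab : a < b := by
          have h1 := hadj 0 hlen
          have h2 := hdiff 0 hlen
          rw [hget0, hget1] at h1 h2
          omega
        intro i hi
        have h1 := hadj i hi
        have h2 := hdiff i hi
        refine ⟨h2, ?_⟩
        simp only [decide_eq_decide]
        exact ⟨fun _ => hab, fun _ => by omega⟩
      · have hadj : ∀ (i : Nat) (h : i + 1 < l'.length), l'[i + 1] ≤ l'[i] :=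
          List.isChain_iff_getElem.mp (List.isChain_iff_pairwise.mpr hm)
        have hab : ¬ (a < b) := by
          have h1 := hadj 0 hlen
          rw [hget0, hget1] at h1
          omega
        intro i hi
        have h1 := hadj i hi
        have h2 := hdiff i hi
        refine ⟨h2, ?_⟩
        simp only [decide_eq_decide]
        exact ⟨fun h' => by omega, fun h' => absurd h' hab⟩
    · intro hg
      have hd : ∀ (i : Nat) (h : i + 1 < l'.length),
          (l'[i] - l'[i + 1]).natAbs ∈ ([1, 2, 3] : List Nat) := by
        intro i h
        have := (hg i h).1
        rw [mem_123_iff]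
        omega
      refine ⟨?_, hd⟩
      by_cases hab : a < b
      · left
        rw [← List.isChain_iff_pairwise, List.isChain_iff_getElem]
        intro i hi
        have h1 := (hg i hi).1
        have h2 := (hg i hi).2
        have h3 : (0 < l'[i + 1] - l'[i]) := by
          have : decide (0 < l'[i + 1] - l'[i]) = true := by rw [h2]; simp [hab]
          exact of_decide_eq_true this
        omega
      · right
        rw [← List.isChain_iff_pairwise, List.isChain_iff_getElem]
        intro i hi
        have h1 := (hg i hi).1
        have h2 := (hg i hi).2
        have h3 : ¬ (0 < l'[i + 1] - l'[i]) := by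
          have : decide (0 < l'[i + 1] - l'[i]) = false := by rw [h2]; simp [hab]
          simpa using of_decide_eq_false this
        show l'[i + 1] ≤ l'[i]
        omega

-- ===== VERDICT (by name: the statement is the Claim_ definition above) =====
theorem validList_spec : Claim_equal_validList := by
  intro line _
  exact main_iff line
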